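-- pv_equiv track=rewrite | github.com/MustafaRiaz/IR-Assignments | Assignment 3/bim.py | non_overlapped_list_model
-- ===== SOURCE A (Python) =====
-- def non_overlapped_list_model(terms, documents):
--     term_docs = {term: set() for term in terms}
--     for doc_id, tokens in documents.items():
--         for term in terms:
--             if term in tokens:
--                 term_docs[term].add(doc_id)
--     non_overlapping_docs = set()
--     for doc_set in term_docs.values():
--         non_overlapping_docs.update(doc_set)
--     return list(non_overlapping_docs)
-- ===== SOURCE B (Python) =====
-- def non_overlapped_list_model(terms, documents):
--     result = set()
--     for doc_id, tokens in documents.items():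
--         if any(term in tokens for term in terms):
--             result.add(doc_id)
--     return list(result)
-- ===== Notes on version B (the rewrite author's own statement) =====
-- stated objective: simpler
-- what changed: Drops the per-term dict index and the second union pass: one pass over documents adds a doc id to a single result set as soon as any query term occurs in its tokens.
import Mathlib
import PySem

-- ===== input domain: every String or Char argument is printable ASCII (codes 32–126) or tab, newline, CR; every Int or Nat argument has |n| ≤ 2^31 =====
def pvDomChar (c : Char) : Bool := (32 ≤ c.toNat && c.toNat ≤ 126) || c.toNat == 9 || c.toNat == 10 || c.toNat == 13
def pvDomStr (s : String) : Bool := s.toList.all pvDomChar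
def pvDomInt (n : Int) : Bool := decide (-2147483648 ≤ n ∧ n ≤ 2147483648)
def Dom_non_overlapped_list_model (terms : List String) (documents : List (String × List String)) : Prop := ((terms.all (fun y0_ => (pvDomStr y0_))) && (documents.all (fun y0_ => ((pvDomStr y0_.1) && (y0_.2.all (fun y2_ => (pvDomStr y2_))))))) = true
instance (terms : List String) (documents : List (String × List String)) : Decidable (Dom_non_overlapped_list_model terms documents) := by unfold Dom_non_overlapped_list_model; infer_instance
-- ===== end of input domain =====

-- B drops A's per-term dict index and union pass: one pass over the documents with a single
-- accumulating result set (objective: simpler). Both Pythons return list(set); since Python's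
-- set iteration (hash) order is not modelled, both ports emit the final set canonically sorted
-- (outputs are compared as sets).


-- ===== PORT A =====
def non_overlapped_list_model (terms : List String) (documents : List (String × List String)) : List String :=
  -- term_docs = {term: set() for term in terms}
  let term_docs : PySem.Dict String (PySem.Set String) :=
    terms.foldl (fun d t => d.insert t PySem.Set.empty) PySem.Dict.empty
  -- for doc_id, tokens in documents.items(): for term in terms: if term in tokens: term_docs[term].add(doc_id)
  -- (term_docs[term].add(doc_id) = modify at a key that is always present; dflt never read)
  let term_docs := documents.foldl
    (fun d p => terms.foldl
      (fun d t => if p.2.contains t then d.modify t PySem.Set.empty (fun s => PySem.Set.add s p.1) else d) d)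
    term_docs
  -- non_overlapping_docs = set(); for doc_set in term_docs.values(): non_overlapping_docs.update(doc_set)
  let non_overlapping_docs :=
    term_docs.values.foldl (fun acc s => PySem.Set.update acc s) PySem.Set.empty
  -- return list(non_overlapping_docs): hash order not modelled, canonical sorted order (compared as a set)
  PySem.List.sorted non_overlapping_docs (fun x => x) false

-- ===== PORT B =====
def non_overlapped_list_model_alt (terms : List String) (documents : List (String × List String)) : List String :=
  -- result = set(); for doc_id, tokens in documents.items(): if any(term in tokens for term in terms): result.add(doc_id)
  let result : PySem.Set String := documents.foldl
    (fun acc p => if terms.any (fun t => p.2.contains t) then PySem.Set.add acc p.1 else acc)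
    PySem.Set.empty
  -- return list(result): hash order not modelled, canonical sorted order (compared as a set)
  PySem.List.sorted result (fun x => x) false

-- ===== PRECONDITION & SPEC =====
def Spec_non_overlapped_list_model (terms : List String) (documents : List (String × List String)) (out : List String) : Prop := out = non_overlapped_list_model_alt terms documents
instance (terms : List String) (documents : List (String × List String)) (out : List String) : Decidable (Spec_non_overlapped_list_model terms documents out) := by unfold Spec_non_overlapped_list_model; infer_instance

-- ===== CLAIM (what is proved, stated in full; the proofs are below) =====
def Claim_equal_non_overlapped_list_model : Prop := ∀ (terms : List String) (documents : List (String × List String)), Dom_non_overlapped_list_model terms documents → Spec_non_overlapped_list_model terms documents (non_overlapped_list_model terms documents)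

-- ===== LEMMAS AND PROOFS =====

-- B's fold: membership
theorem mem_b_fold (docs : List (String × List String)) (terms : List String)
    (acc : PySem.Set String) (x : String) :
    x ∈ docs.foldl (fun acc p => if terms.any (fun t => p.2.contains t) then PySem.Set.add acc p.1 else acc) acc ↔
      x ∈ acc ∨ ∃ p ∈ docs, (terms.any (fun t => p.2.contains t)) = true ∧ x = p.1 := by
  induction docs generalizing acc with
  | nil => simp
  | cons q qs ih =>
    simp only [List.foldl_cons]
    by_cases hq : (terms.any (fun t => q.2.contains t)) = true
    · simp only [if_pos hq, ih, PySem.Set.mem_add, List.mem_cons]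
      constructor
      · rintro ((hx | rfl) | ⟨p, hp, hcp, hx⟩)
        · exact Or.inl hx
        · exact Or.inr ⟨q, Or.inl rfl, hq, rfl⟩
        · exact Or.inr ⟨p, Or.inr hp, hcp, hx⟩
      · rintro (hx | ⟨p, (rfl | hp), hcp, hx⟩)
        · exact Or.inl (Or.inl hx)
        · exact Or.inl (Or.inr hx)
        · exact Or.inr ⟨p, hp, hcp, hx⟩
    · simp only [if_neg hq, ih, List.mem_cons]
      constructor
      · rintro (hx | ⟨p, hp, hcp, hx⟩)
        · exact Or.inl hx
        · exact Or.inr ⟨p, Or.inr hp, hcp, hx⟩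
      · rintro (hx | ⟨p, (rfl | hp), hcp, hx⟩)
        · exact Or.inl hx
        · exact absurd hcp hq
        · exact Or.inr ⟨p, hp, hcp, hx⟩

-- B's fold: nodup
theorem nodup_b_fold (docs : List (String × List String)) (terms : List String)
    (acc : PySem.Set String) (h : acc.Nodup) :
    (docs.foldl (fun acc p => if terms.any (fun t => p.2.contains t) then PySem.Set.add acc p.1 else acc) acc).Nodup := by
  induction docs generalizing acc with
  | nil => exact h
  | cons q qs ih =>
    simp only [List.foldl_cons]
    split
    · exact ih _ (PySem.Set.nodup_add _ _ h)
    · exact ih _ h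

-- Set.add is idempotent
theorem set_add_add (s : PySem.Set String) (x : String) :
    PySem.Set.add (PySem.Set.add s x) x = PySem.Set.add s x := by
  apply PySem.Set.add_of_mem
  simp [PySem.Set.mem_add]

-- inner loop of A (one document): getD characterisation
theorem inner_getD (ts : List String) (p : String × List String)
    (d : PySem.Dict String (PySem.Set String)) (t0 : String) :
    (ts.foldl (fun d t => if p.2.contains t then d.modify t PySem.Set.empty (fun s => PySem.Set.add s p.1) else d) d).getD t0 PySem.Set.empty
      = if t0 ∈ ts ∧ p.2.contains t0 = true then PySem.Set.add (d.getD t0 PySem.Set.empty) p.1 else d.getD t0 PySem.Set.empty := by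
  induction ts generalizing d with
  | nil => simp
  | cons t ts ih =>
    simp only [List.foldl_cons]
    rw [ih]
    by_cases hc : p.2.contains t = true
    · rw [if_pos hc]
      by_cases ht : t0 = t
      · subst ht
        rw [PySem.Dict.getD_modify, if_pos rfl]
        by_cases hm : t0 ∈ ts
        · rw [if_pos ⟨hm, hc⟩, if_pos ⟨List.mem_cons_self .., hc⟩, set_add_add]
        · rw [if_neg (fun h => hm h.1), if_pos ⟨List.mem_cons_self .., hc⟩]
      · rw [PySem.Dict.getD_modify, if_neg ht]
        have hiff : (t0 ∈ ts ∧ p.2.contains t0 = true) ↔ (t0 ∈ t :: ts ∧ p.2.contains t0 = true) := by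
          simp [List.mem_cons, ht]
        rw [if_congr hiff rfl rfl]
    · rw [if_neg hc]
      by_cases ht : t0 = t
      · subst ht
        rw [if_neg (fun h => hc h.2), if_neg (fun h => hc h.2)]
      · have hiff : (t0 ∈ ts ∧ p.2.contains t0 = true) ↔ (t0 ∈ t :: ts ∧ p.2.contains t0 = true) := by
          simp [List.mem_cons, ht]
        rw [if_congr hiff rfl rfl]

-- inner loop of A: keys unchanged (every modified key is already a key)
theorem inner_keys (ts : List String) (p : String × List String)
    (d : PySem.Dict String (PySem.Set String)) (hk : ∀ t ∈ ts, t ∈ d.keys) :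
    (ts.foldl (fun d t => if p.2.contains t then d.modify t PySem.Set.empty (fun s => PySem.Set.add s p.1) else d) d).keys = d.keys := by
  induction ts generalizing d with
  | nil => rfl
  | cons t ts ih =>
    simp only [List.foldl_cons]
    by_cases hc : p.2.contains t = true
    · rw [if_pos hc]
      have hkeys : (d.modify t PySem.Set.empty (fun s => PySem.Set.add s p.1)).keys = d.keys := by
        rw [PySem.Dict.keys_modify, PySem.Dict.keys_insert_of_contains]
        exact (PySem.Dict.contains_iff_mem_keys _ _).mpr (hk t (List.mem_cons_self ..))
      rw [ih _ (fun u hu => by rw [hkeys]; exact hk u (List.mem_cons_of_mem _ hu)), hkeys]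
    · rw [if_neg hc]
      exact ih d (fun u hu => hk u (List.mem_cons_of_mem _ hu))

-- outer loop of A: getD characterisation
theorem outer_getD (docs : List (String × List String)) (terms : List String)
    (d : PySem.Dict String (PySem.Set String)) (t0 : String) (x : String) :
    x ∈ (docs.foldl (fun d p => terms.foldl (fun d t => if p.2.contains t then d.modify t PySem.Set.empty (fun s => PySem.Set.add s p.1) else d) d) d).getD t0 PySem.Set.empty ↔
      x ∈ d.getD t0 PySem.Set.empty ∨ (t0 ∈ terms ∧ ∃ p ∈ docs, p.2.contains t0 = true ∧ x = p.1) := by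
  induction docs generalizing d with
  | nil => simp
  | cons q qs ih =>
    simp only [List.foldl_cons]
    rw [ih, inner_getD]
    by_cases h : t0 ∈ terms ∧ q.2.contains t0 = true
    · rw [if_pos h]
      simp only [PySem.Set.mem_add, List.mem_cons]
      constructor
      · rintro ((hx | rfl) | ⟨ht, p, hp, hcp, hx⟩)
        · exact Or.inl hx
        · exact Or.inr ⟨h.1, q, Or.inl rfl, h.2, rfl⟩
        · exact Or.inr ⟨ht, p, Or.inr hp, hcp, hx⟩
      · rintro (hx | ⟨ht, p, (rfl | hp), hcp, hx⟩)
        · exact Or.inl (Or.inl hx)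
        · exact Or.inl (Or.inr hx)
        · exact Or.inr ⟨ht, p, hp, hcp, hx⟩
    · rw [if_neg h]
      simp only [List.mem_cons]
      constructor
      · rintro (hx | ⟨ht, p, hp, hcp, hx⟩)
        · exact Or.inl hx
        · exact Or.inr ⟨ht, p, Or.inr hp, hcp, hx⟩
      · rintro (hx | ⟨ht, p, (rfl | hp), hcp, hx⟩)
        · exact Or.inl hx
        · exact absurd ⟨ht, hcp⟩ h
        · exact Or.inr ⟨ht, p, hp, hcp, hx⟩

-- outer loop of A: keys unchanged
theorem outer_keys (docs : List (String × List String)) (terms : List String)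
    (d : PySem.Dict String (PySem.Set String)) (hk : ∀ t ∈ terms, t ∈ d.keys) :
    (docs.foldl (fun d p => terms.foldl (fun d t => if p.2.contains t then d.modify t PySem.Set.empty (fun s => PySem.Set.add s p.1) else d) d) d).keys = d.keys := by
  induction docs generalizing d with
  | nil => rfl
  | cons q qs ih =>
    simp only [List.foldl_cons]
    rw [ih _ (fun t ht => by rw [inner_keys _ _ _ hk]; exact hk t ht), inner_keys _ _ _ hk]

-- the initial dict: every getD is the empty set
theorem init_getD (ts : List String) (d : PySem.Dict String (PySem.Set String))
    (h : ∀ t, d.getD t PySem.Set.empty = PySem.Set.empty) (t0 : String) :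
    (ts.foldl (fun d t => d.insert t PySem.Set.empty) d).getD t0 PySem.Set.empty = PySem.Set.empty := by
  induction ts generalizing d with
  | nil => exact h t0
  | cons t ts ih =>
    simp only [List.foldl_cons]
    refine ih _ (fun u => ?_)
    rw [PySem.Dict.getD_insert]
    split
    · rfl
    · exact h u

-- union fold: membership
theorem mem_union_fold (vals : List (PySem.Set String)) (acc : PySem.Set String) (x : String) :
    x ∈ vals.foldl (fun acc s => PySem.Set.update acc s) acc ↔ x ∈ acc ∨ ∃ s ∈ vals, x ∈ s := by
  induction vals generalizing acc with
  | nil => simp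
  | cons v vs ih => simp [ih, PySem.Set.mem_update]; tauto

-- union fold: nodup
theorem nodup_union_fold (vals : List (PySem.Set String)) (acc : PySem.Set String) (h : acc.Nodup) :
    (vals.foldl (fun acc s => PySem.Set.update acc s) acc).Nodup := by
  induction vals generalizing acc with
  | nil => exact h
  | cons v vs ih => exact ih _ (PySem.Set.nodup_update _ _ h)

-- ===== VERDICT (by name: the statement is the Claim_ definition above) =====
theorem non_overlapped_list_model_spec : Claim_equal_non_overlapped_list_model := by
  intro terms documents _
  unfold Spec_non_overlapped_list_model non_overlapped_list_model non_overlapped_list_model_alt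
  set d0 : PySem.Dict String (PySem.Set String) :=
    terms.foldl (fun d t => d.insert t PySem.Set.empty) PySem.Dict.empty with hd0
  set df : PySem.Dict String (PySem.Set String) :=
    documents.foldl (fun d p => terms.foldl
      (fun d t => if p.2.contains t then d.modify t PySem.Set.empty (fun s => PySem.Set.add s p.1) else d) d) d0 with hdf
  -- keys of the initial and final dict
  have hkeys0 : d0.keys = PySem.Set.ofList terms := by
    rw [hd0, PySem.Dict.keys_foldl_insert (f := fun _ _ => PySem.Set.empty)]
    rfl
  have hk : ∀ t ∈ terms, t ∈ d0.keys := by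
    intro t ht; rw [hkeys0]; exact (PySem.Set.mem_ofList _ _).mpr ht
  have hkeysf : df.keys = PySem.Set.ofList terms := by
    rw [hdf, outer_keys _ _ _ hk, hkeys0]
  have hnd : df.keys.Nodup := by rw [hkeysf]; exact PySem.Set.nodup_ofList terms
  -- membership in A's final union set
  have hA : ∀ x, (x ∈ df.values.foldl (fun acc s => PySem.Set.update acc s) PySem.Set.empty ↔
      ∃ p ∈ documents, (terms.any (fun t => p.2.contains t)) = true ∧ x = p.1) := by
    intro x
    rw [mem_union_fold]
    rw [PySem.Dict.values_eq_map_keys df hnd PySem.Set.empty]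
    constructor
    · rintro (hx | ⟨s, hs, hxs⟩)
      · exact absurd hx (List.not_mem_nil)
      · obtain ⟨k, hkk, rfl⟩ := List.mem_map.mp hs
        rw [hdf, outer_getD] at hxs
        rcases hxs with hx0 | ⟨ht, p, hp, hcp, hx⟩
        · rw [init_getD terms PySem.Dict.empty (fun t => PySem.Dict.getD_empty ..)] at hx0
          exact absurd hx0 (List.not_mem_nil)
        · exact ⟨p, hp, List.any_eq_true.mpr ⟨k, ht, hcp⟩, hx⟩
    · rintro ⟨p, hp, hany, hx⟩
      obtain ⟨t, ht, hcp⟩ := List.any_eq_true.mp hany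
      refine Or.inr ⟨df.getD t PySem.Set.empty, List.mem_map.mpr ⟨t, ?_, rfl⟩, ?_⟩
      · rw [hkeysf]; exact (PySem.Set.mem_ofList _ _).mpr ht
      · rw [hdf, outer_getD]
        exact Or.inr ⟨ht, p, hp, hcp, hx⟩
  -- membership in B's set
  have hB : ∀ x, (x ∈ documents.foldl
      (fun acc p => if terms.any (fun t => p.2.contains t) then PySem.Set.add acc p.1 else acc) PySem.Set.empty ↔
      ∃ p ∈ documents, (terms.any (fun t => p.2.contains t)) = true ∧ x = p.1) := by
    intro x
    rw [mem_b_fold]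
    constructor
    · rintro (hx | hx)
      · exact absurd hx (List.not_mem_nil)
      · exact hx
    · exact Or.inr
  -- both are nodup lists with the same members, hence a permutation; sorted of both agree
  apply PySem.List.sorted_eq_sorted_of_perm _ _ (fun x => x) (fun a b h => h)
  refine (List.perm_ext_iff_of_nodup (nodup_union_fold _ _ List.nodup_nil) (nodup_b_fold _ _ _ List.nodup_nil)).mpr ?_
  intro a
  exact (hA a).trans (hB a).symm
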